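-- pv_equiv track=rewrite | github.com/DIRACGrid/signurlarity | src/signurlarity/presigner.py | _uri_encode
-- ===== SOURCE A (Python) =====
-- def _uri_encode(s: str) -> str:
--     """URI encode a string following AWS requirements."""
--     # AWS requires specific encoding: encode everything except unreserved chars
--     result = []
--     for char in s:
--         if (
--             char
--             in "ABCDEFGHIJKLMNOPQRSTUVWXYZabcdefghijklmnopqrstuvwxyz0123456789-._~"
--         ):
--             result.append(char)
--         else:
--             for byte in char.encode("utf-8"):
--                 result.append(f"%{byte:02X}")
--     return "".join(result)
-- ===== SOURCE B (Python) =====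
-- def _uri_encode(s: str) -> str:
--     """URI encode a string following AWS requirements."""
--     out = ""
--     for b in s.encode("utf-8"):
--         if 65 <= b <= 90 or 97 <= b <= 122 or 48 <= b <= 57 or b in (45, 46, 95, 126):
--             out += chr(b)
--         else:
--             hi, lo = b >> 4, b & 15
--             out += "%" + chr(48 + hi if hi < 10 else 55 + hi) + chr(48 + lo if lo < 10 else 55 + lo)
--     return out
-- ===== Notes on version B (the rewrite author's own statement) =====
-- stated objective: alternative
-- what changed: B flattens A's nested char-then-byte loop into a single pass over the UTF-8 byte stream, classifies each byte by arithmetic code ranges instead of membership in the 66-char string, and builds the output string directly (hex digits computed arithmetically) instead of joining a token list.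
import Mathlib
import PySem

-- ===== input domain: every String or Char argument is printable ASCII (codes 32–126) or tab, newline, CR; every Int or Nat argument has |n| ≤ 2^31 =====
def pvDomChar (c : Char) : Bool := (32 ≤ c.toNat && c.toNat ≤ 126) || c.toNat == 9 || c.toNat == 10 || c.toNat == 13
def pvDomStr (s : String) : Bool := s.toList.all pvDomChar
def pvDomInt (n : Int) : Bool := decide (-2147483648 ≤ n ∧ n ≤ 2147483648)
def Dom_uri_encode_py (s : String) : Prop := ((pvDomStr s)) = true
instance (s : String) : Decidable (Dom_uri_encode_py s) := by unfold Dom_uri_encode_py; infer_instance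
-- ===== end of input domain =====

-- B flattens A's nested char-then-byte loop into one pass over the UTF-8 byte stream,
-- classifying each byte by arithmetic code ranges and emitting output characters directly
-- (objective: alternative).

-- ===== PORT A =====
-- the 66 unreserved characters, as in A's string literal
def pvUnreserved : List Char :=
  "ABCDEFGHIJKLMNOPQRSTUVWXYZabcdefghijklmnopqrstuvwxyz0123456789-._~".toList

-- f"%{byte:02X}" : uppercase two-digit hex of a byte
def pvHexDigit (d : Nat) : Char := if d < 10 then Char.ofNat (48 + d) else Char.ofNat (55 + d)
def pvHex2 (b : Nat) : String := String.ofList ['%', pvHexDigit (b / 16), pvHexDigit (b % 16)]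

-- char.encode("utf-8") / s.encode("utf-8") as the list of byte values (exact UTF-8)
def pvUtf8Bytes (n : Nat) : List Nat :=
  if n < 0x80 then [n]
  else if n < 0x800 then [0xC0 ||| (n >>> 6), 0x80 ||| (n &&& 0x3F)]
  else if n < 0x10000 then
    [0xE0 ||| (n >>> 12), 0x80 ||| ((n >>> 6) &&& 0x3F), 0x80 ||| (n &&& 0x3F)]
  else
    [0xF0 ||| (n >>> 18), 0x80 ||| ((n >>> 12) &&& 0x3F),
     0x80 ||| ((n >>> 6) &&& 0x3F), 0x80 ||| (n &&& 0x3F)]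

-- A: accumulate tokens per character (the unreserved char itself, or one "%XX" per UTF-8 byte), then join
def uri_encode_py (s : String) : String :=
  PySem.Str.join "" (s.toList.foldl (fun result c =>
    if pvUnreserved.contains c then result ++ [String.ofList [c]]
    else result ++ (pvUtf8Bytes c.toNat).map (fun b => pvHex2 b)) [])

-- ===== PORT B =====
-- B: one pass over the UTF-8 bytes of s; each byte is classified by arithmetic code ranges
-- and the output characters are appended directly (hex digits computed arithmetically)
def uri_encode_py_alt (s : String) : String :=
  String.ofList ((s.toList.flatMap (fun c => pvUtf8Bytes c.toNat)).foldl (fun out b =>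
    if (65 ≤ b ∧ b ≤ 90) ∨ (97 ≤ b ∧ b ≤ 122) ∨ (48 ≤ b ∧ b ≤ 57)
        ∨ b = 45 ∨ b = 46 ∨ b = 95 ∨ b = 126 then
      out ++ [Char.ofNat b]
    else
      out ++ ['%',
        Char.ofNat (if b >>> 4 < 10 then 48 + b >>> 4 else 55 + b >>> 4),
        Char.ofNat (if b &&& 15 < 10 then 48 + (b &&& 15) else 55 + (b &&& 15))]) [])

-- ===== PRECONDITION & SPEC =====
def Spec_uri_encode_py (s : String) (out : String) : Prop := out = uri_encode_py_alt s
instance (s : String) (out : String) : Decidable (Spec_uri_encode_py s out) := by unfold Spec_uri_encode_py; infer_instance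

-- ===== CLAIM (what is proved, stated in full; the proofs are below) =====
def Claim_equal_uri_encode_py : Prop := ∀ (s : String), Dom_uri_encode_py s → Spec_uri_encode_py s (uri_encode_py s)

-- ===== LEMMAS AND PROOFS =====

-- B's per-byte output characters, as a function (proof-side abbreviation of B's fold body)
def pvAltByte (b : Nat) : List Char :=
  if (65 ≤ b ∧ b ≤ 90) ∨ (97 ≤ b ∧ b ≤ 122) ∨ (48 ≤ b ∧ b ≤ 57)
      ∨ b = 45 ∨ b = 46 ∨ b = 95 ∨ b = 126 then
    [Char.ofNat b]
  else
    ['%',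
      Char.ofNat (if b >>> 4 < 10 then 48 + b >>> 4 else 55 + b >>> 4),
      Char.ofNat (if b &&& 15 < 10 then 48 + (b &&& 15) else 55 + (b &&& 15))]

-- A's per-char token list, as characters
def pvACharTok (c : Char) : List Char :=
  if pvUnreserved.contains c then [c]
  else (pvUtf8Bytes c.toNat).flatMap (fun b => ['%', pvHexDigit (b / 16), pvHexDigit (b % 16)])

lemma pvUtf8_ascii (n : Nat) (h : n < 128) : pvUtf8Bytes n = [n] := by
  simp [pvUtf8Bytes, h]

-- per-byte agreement for ASCII bytes, by exhaustive evaluation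
set_option maxRecDepth 40000 in
lemma pv_perByte_fin : ∀ b : Fin 128,
    pvACharTok (Char.ofNat b.val) = pvAltByte b.val := by decide

lemma pv_perChar (c : Char) (h : pvDomChar c = true) :
    pvACharTok c = (pvUtf8Bytes c.toNat).flatMap pvAltByte := by
  have hlt : c.toNat < 128 := by simp [pvDomChar] at h; omega
  rw [pvUtf8_ascii c.toNat hlt]
  have := pv_perByte_fin ⟨c.toNat, hlt⟩
  simp only [Char.ofNat_toNat] at this
  simp [this]

lemma pv_join_flatten (xss : List (List Char)) :
    PySem.Chars.join [] xss = xss.flatten := by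
  induction xss with
  | nil => rw [PySem.Chars.join_nil]; rfl
  | cons x xs ih =>
    cases xs with
    | nil => rw [PySem.Chars.join_singleton]; simp
    | cons y ys => rw [PySem.Chars.join_cons_cons] at *; simp_all

lemma pv_flatten_flatMap {α β : Type} (l : List α) (f : α → List (List β)) :
    (l.flatMap f).flatten = l.flatMap (fun a => (f a).flatten) := by
  induction l with
  | nil => rfl
  | cons x xs ih => simp [List.flatMap_cons, ih]

lemma pv_a_tokens (l : List Char) :
    (l.foldl (fun result c =>
      if pvUnreserved.contains c then result ++ [String.ofList [c]]
      else result ++ (pvUtf8Bytes c.toNat).map (fun b => pvHex2 b)) [])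
    = l.flatMap (fun c =>
        if pvUnreserved.contains c then [String.ofList [c]]
        else (pvUtf8Bytes c.toNat).map (fun b => pvHex2 b)) := by
  have hfun : (fun (result : List String) c =>
      if pvUnreserved.contains c then result ++ [String.ofList [c]]
      else result ++ (pvUtf8Bytes c.toNat).map (fun b => pvHex2 b))
      = (fun result c => result ++
          (if pvUnreserved.contains c then [String.ofList [c]]
           else (pvUtf8Bytes c.toNat).map (fun b => pvHex2 b))) := by
    funext r c; split <;> rfl
  rw [hfun, PySem.List.foldl_append_eq_flatMap, List.nil_append]

lemma pv_b_chars (bs : List Nat) :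
    (bs.foldl (fun out b =>
      if (65 ≤ b ∧ b ≤ 90) ∨ (97 ≤ b ∧ b ≤ 122) ∨ (48 ≤ b ∧ b ≤ 57)
          ∨ b = 45 ∨ b = 46 ∨ b = 95 ∨ b = 126 then
        out ++ [Char.ofNat b]
      else
        out ++ ['%',
          Char.ofNat (if b >>> 4 < 10 then 48 + b >>> 4 else 55 + b >>> 4),
          Char.ofNat (if b &&& 15 < 10 then 48 + (b &&& 15) else 55 + (b &&& 15))]) [])
    = bs.flatMap pvAltByte := by
  have hfun : (fun (out : List Char) b =>
      if (65 ≤ b ∧ b ≤ 90) ∨ (97 ≤ b ∧ b ≤ 122) ∨ (48 ≤ b ∧ b ≤ 57)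
          ∨ b = 45 ∨ b = 46 ∨ b = 95 ∨ b = 126 then
        out ++ [Char.ofNat b]
      else
        out ++ ['%',
          Char.ofNat (if b >>> 4 < 10 then 48 + b >>> 4 else 55 + b >>> 4),
          Char.ofNat (if b &&& 15 < 10 then 48 + (b &&& 15) else 55 + (b &&& 15))])
      = (fun out b => out ++ pvAltByte b) := by
    funext o b; unfold pvAltByte; split <;> rfl
  rw [hfun, PySem.List.foldl_append_eq_flatMap, List.nil_append]

-- ===== VERDICT (by name: the statement is the Claim_ definition above) =====
theorem uri_encode_py_spec : Claim_equal_uri_encode_py := by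
  intro s hdom
  unfold Spec_uri_encode_py uri_encode_py uri_encode_py_alt
  rw [pv_a_tokens, pv_b_chars]
  apply String.toList_inj.mp
  rw [PySem.Str.toList_join, String.toList_ofList]
  rw [pv_join_flatten]
  simp only [String.toList_ofList, List.map_flatMap, pv_flatten_flatMap, List.flatMap_assoc]
  apply List.flatMap_congr
  intro c hc
  have hdc : pvDomChar c = true := by
    have := hdom; unfold Dom_uri_encode_py pvDomStr at this
    exact (List.all_eq_true.mp this) c hc
  have h1 : (List.map String.toList
      (if pvUnreserved.contains c = true then [String.ofList [c]]
       else List.map (fun b => pvHex2 b) (pvUtf8Bytes c.toNat))).flatten = pvACharTok c := by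
    unfold pvACharTok
    split <;> simp [pvHex2, List.flatMap, Function.comp_def]
  rw [h1, pv_perChar c hdc]
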